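-- pv_equiv track=rewrite | github.com/TuxML/tuxml-web | views/ML/params.py | getParam
-- ===== SOURCE A (Python) =====
-- def getParam(line):
--     param = ""
--     eg = 0
--     for char in line :
--         if char == " ":
--             continue
--         elif char == "#":
--             param = ""
--             break
--         elif char == "=":
--             eg = 1
--             break
--         else:
--             param = param + char
--     if eg != 1:
--         param = ""
--     return param
-- ===== SOURCE B (Python) =====
-- def getParam(line):
--     e = line.find("=")
--     if e == -1:
--         return ""
--     h = line.find("#")
--     if h != -1 and h < e:
--         return ""
--     return line[:e].replace(" ", "")
-- ===== Notes on version B (the rewrite author's own statement) =====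
-- stated objective: faster
-- what changed: Replaces the char-by-char state machine (flag eg, early breaks, string concatenation) with find for the first '=' and '#', then one slice plus replace to drop spaces; these run in C, removing the per-character Python loop.
import Mathlib
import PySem

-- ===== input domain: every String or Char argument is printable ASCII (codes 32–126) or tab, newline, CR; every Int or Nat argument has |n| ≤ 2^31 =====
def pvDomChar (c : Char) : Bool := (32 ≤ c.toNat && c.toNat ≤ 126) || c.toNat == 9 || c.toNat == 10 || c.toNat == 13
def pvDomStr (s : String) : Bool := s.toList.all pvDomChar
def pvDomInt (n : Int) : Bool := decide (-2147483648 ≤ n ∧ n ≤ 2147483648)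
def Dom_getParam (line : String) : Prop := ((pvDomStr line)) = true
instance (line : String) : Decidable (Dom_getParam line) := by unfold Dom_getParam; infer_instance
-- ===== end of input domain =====

-- B replaces A's char-by-char state machine with find of '=' and '#' plus slice-and-replace; a timing run measured B faster.

-- ===== PORT A =====
-- A's for-loop with its two `break`s and the `eg` flag: structural recursion on the chars;
-- reaching the end without '=' (eg ≠ 1) and hitting '#' both yield "".
def getParamGo : List Char → List Char → List Char
  | [], _ => []
  | c :: rest, param =>
    if c = ' ' then getParamGo rest param
    else if c = '#' then []
    else if c = '=' then param
    else getParamGo rest (param ++ [c])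

def getParam (line : String) : String := String.ofList (getParamGo line.toList [])

-- ===== PORT B =====
def getParam_alt (line : String) : String :=
  let e := PySem.Str.find line "="
  if e = -1 then ""
  else
    let h := PySem.Str.find line "#"
    if h ≠ -1 ∧ h < e then ""
    else PySem.Str.replace (PySem.Str.slice line none (some e)) " " ""

-- ===== PRECONDITION & SPEC =====
def Spec_getParam (line : String) (out : String) : Prop := out = getParam_alt line
instance (line : String) (out : String) : Decidable (Spec_getParam line out) := by unfold Spec_getParam; infer_instance

-- ===== CLAIM (what is proved, stated in full; the proofs are below) =====
def Claim_equal_getParam : Prop := ∀ (line : String), Dom_getParam line → Spec_getParam line (getParam line)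

-- ===== LEMMAS AND PROOFS =====

-- unfolding step of PySem.Chars.find.go
theorem findGo_cons (sub : List Char) (x : Char) (l : List Char) (k : Nat) :
    PySem.Chars.find.go sub (x :: l) k =
      if sub.isPrefixOf (x :: l) then (k : Int) else PySem.Chars.find.go sub l (k + 1) := rfl

-- the index offset of find.go is a plain shift
theorem findGo_shift (c : Char) (l : List Char) (k : Nat) :
    PySem.Chars.find.go [c] l k =
      if PySem.Chars.find.go [c] l 0 = -1 then -1 else PySem.Chars.find.go [c] l 0 + k := by
  induction l generalizing k with
  | nil => rfl
  | cons x t ih =>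
    by_cases hx : x = c
    · simp [findGo_cons, hx, List.isPrefixOf]
    · have hp : ([c].isPrefixOf (x :: t)) = false := by
        simp [List.isPrefixOf]; exact fun h => (hx h.symm).elim
      rw [findGo_cons, findGo_cons, hp]
      rw [ih (k + 1), ih 1]
      have hb : (-1 : Int) ≤ PySem.Chars.find.go [c] t 0 := PySem.Chars.neg_one_le_find t [c]
      split_ifs <;> push_cast <;> omega

-- replace by "" with a one-char pattern is a filter (enough fuel given)
theorem replaceGo_filter (c : Char) (l acc : List Char) (fuel : Nat) (hf : l.length ≤ fuel) :
    PySem.Chars.replace.go [c] [] fuel l acc = acc.reverse ++ l.filter (· ≠ c) := by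
  induction l generalizing acc fuel with
  | nil => cases fuel <;> simp [PySem.Chars.replace.go]
  | cons x t ih =>
    cases fuel with
    | zero => simp at hf
    | succ n =>
      by_cases hx : x = c
      · have hp : ([c].isPrefixOf (x :: t)) = true := by simp [List.isPrefixOf, hx]
        simp only [PySem.Chars.replace.go, hp, if_true, List.reverse_nil, List.nil_append]
        rw [show List.drop [c].length (x :: t) = t from rfl]
        rw [ih acc n (by simpa using hf)]
        simp [hx]
      · have hp : ([c].isPrefixOf (x :: t)) = false := by
          simp [List.isPrefixOf]; exact fun h => (hx h.symm).elim
        simp only [PySem.Chars.replace.go, hp]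
        rw [ih (x :: acc) n (by simpa using Nat.le_of_succ_le_succ hf)]
        simp [hx]

theorem replace_filter (c : Char) (l : List Char) :
    PySem.Chars.replace l [c] [] = l.filter (· ≠ c) := by
  have : PySem.Chars.replace l [c] [] = PySem.Chars.replace.go [c] [] l.length l [] := by
    simp [PySem.Chars.replace, List.isEmpty]
  rw [this, replaceGo_filter c l [] l.length le_rfl]
  rfl

theorem find_cons_singleton (c x : Char) (t : List Char) :
    PySem.Chars.find (x :: t) [c] =
      if x = c then 0
      else if PySem.Chars.find t [c] = -1 then -1 else PySem.Chars.find t [c] + 1 := by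
  show PySem.Chars.find.go [c] (x :: t) 0 = _
  by_cases hx : x = c
  · simp [findGo_cons, hx, List.isPrefixOf]
  · have hp : ([c].isPrefixOf (x :: t)) = false := by
      simp [List.isPrefixOf]; exact fun h => (hx h.symm).elim
    rw [findGo_cons, hp, if_neg hx, findGo_shift]
    have hgo : PySem.Chars.find t [c] = PySem.Chars.find.go [c] t 0 := rfl
    rw [hgo]
    norm_num

theorem main_lemma (l : List Char) (acc : List Char) :
    getParamGo l acc =
      (if PySem.Chars.find l ['='] = -1 then []
       else if PySem.Chars.find l ['#'] ≠ -1 ∧ PySem.Chars.find l ['#'] < PySem.Chars.find l ['='] then []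
       else acc ++ PySem.Chars.replace (l.take (PySem.Chars.find l ['=']).toNat) [' '] []) := by
  induction l generalizing acc with
  | nil =>
    have h0 : PySem.Chars.find ([] : List Char) ['='] = -1 := rfl
    rw [h0]
    simp [getParamGo]
  | cons x t ih =>
    have hne := PySem.Chars.neg_one_le_find t ['=']
    have hnh := PySem.Chars.neg_one_le_find t ['#']
    rw [find_cons_singleton, find_cons_singleton]
    by_cases hsp : x = ' '
    · subst hsp
      have hstep : getParamGo (' ' :: t) acc = getParamGo t acc := rfl
      rw [hstep, ih acc]
      simp only [show (' ' = '=') = False from by simp, show (' ' = '#') = False from by simp,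
        if_false]
      by_cases he : PySem.Chars.find t ['='] = -1
      · simp [he]
      · simp only [he, if_false]
        rw [if_neg (show ¬ (PySem.Chars.find t ['='] + 1 = -1) by omega)]
        have ht : ((PySem.Chars.find t ['='] + 1).toNat) = (PySem.Chars.find t ['=']).toNat + 1 := by
          omega
        by_cases hh : PySem.Chars.find t ['#'] = -1
        · simp only [hh, if_true]
          rw [if_neg (show ¬ ((-1 : Int) ≠ -1 ∧ (-1 : Int) < PySem.Chars.find t ['='] + 1) by simp),
            if_neg (show ¬ ((-1 : Int) ≠ -1 ∧ (-1 : Int) < PySem.Chars.find t ['=']) by simp), ht]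
          simp [replace_filter]
        · simp only [hh, if_false]
          by_cases hc : PySem.Chars.find t ['#'] < PySem.Chars.find t ['=']
          · rw [if_pos (show (PySem.Chars.find t ['#'] + 1 ≠ -1 ∧
                PySem.Chars.find t ['#'] + 1 < PySem.Chars.find t ['='] + 1) from ⟨by omega, by omega⟩),
              if_pos (show (PySem.Chars.find t ['#'] ≠ -1 ∧
                PySem.Chars.find t ['#'] < PySem.Chars.find t ['=']) from ⟨hh, hc⟩)]
          · rw [if_neg (show ¬ (PySem.Chars.find t ['#'] + 1 ≠ -1 ∧
                PySem.Chars.find t ['#'] + 1 < PySem.Chars.find t ['='] + 1) by rintro ⟨-, h⟩; omega),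
              if_neg (show ¬ (PySem.Chars.find t ['#'] ≠ -1 ∧
                PySem.Chars.find t ['#'] < PySem.Chars.find t ['=']) by rintro ⟨-, h⟩; omega), ht]
            simp [replace_filter]
    · by_cases hha : x = '#'
      · subst hha
        have hstep : getParamGo ('#' :: t) acc = [] := rfl
        rw [hstep]
        simp only [show ('#' = '=') = False from by simp, if_false, if_true]
        by_cases he : PySem.Chars.find t ['='] = -1
        · simp [he]
        · simp only [he, if_false]
          rw [if_neg (show ¬ (PySem.Chars.find t ['='] + 1 = -1) by omega),
            if_pos (show ((0 : Int) ≠ -1 ∧ (0 : Int) < PySem.Chars.find t ['='] + 1) from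
              ⟨by decide, by omega⟩)]
      · by_cases heq : x = '='
        · subst heq
          have hstep : getParamGo ('=' :: t) acc = acc := rfl
          rw [hstep]
          simp only [show ('=' = '#') = False from by simp, if_true, if_false]
          rw [if_neg (show ¬ ((0 : Int) = -1) by decide),
            if_neg (show ¬ ((if PySem.Chars.find t ['#'] = -1 then (-1 : Int)
              else PySem.Chars.find t ['#'] + 1) ≠ -1 ∧
              (if PySem.Chars.find t ['#'] = -1 then (-1 : Int)
              else PySem.Chars.find t ['#'] + 1) < 0) by
              split_ifs with h
              · simp
              · rintro ⟨-, hlt⟩; omega)]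
          simp [replace_filter]
        · have hstep : getParamGo (x :: t) acc = getParamGo t (acc ++ [x]) := by
            simp only [getParamGo, if_neg hsp, if_neg hha, if_neg heq]
          rw [hstep, ih (acc ++ [x])]
          simp only [if_neg heq, if_neg hha]
          by_cases he : PySem.Chars.find t ['='] = -1
          · simp [he]
          · simp only [he, if_false]
            rw [if_neg (show ¬ (PySem.Chars.find t ['='] + 1 = -1) by omega)]
            have ht : ((PySem.Chars.find t ['='] + 1).toNat) = (PySem.Chars.find t ['=']).toNat + 1 := by
              omega
            by_cases hh : PySem.Chars.find t ['#'] = -1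
            · simp only [hh, if_true]
              rw [if_neg (show ¬ ((-1 : Int) ≠ -1 ∧ (-1 : Int) < PySem.Chars.find t ['='] + 1) by simp),
                if_neg (show ¬ ((-1 : Int) ≠ -1 ∧ (-1 : Int) < PySem.Chars.find t ['=']) by simp), ht]
              simp [replace_filter, hsp]
            · simp only [hh, if_false]
              by_cases hc : PySem.Chars.find t ['#'] < PySem.Chars.find t ['=']
              · rw [if_pos (show (PySem.Chars.find t ['#'] + 1 ≠ -1 ∧
                    PySem.Chars.find t ['#'] + 1 < PySem.Chars.find t ['='] + 1) from ⟨by omega, by omega⟩),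
                  if_pos (show (PySem.Chars.find t ['#'] ≠ -1 ∧
                    PySem.Chars.find t ['#'] < PySem.Chars.find t ['=']) from ⟨hh, hc⟩)]
              · rw [if_neg (show ¬ (PySem.Chars.find t ['#'] + 1 ≠ -1 ∧
                    PySem.Chars.find t ['#'] + 1 < PySem.Chars.find t ['='] + 1) by rintro ⟨-, h⟩; omega),
                  if_neg (show ¬ (PySem.Chars.find t ['#'] ≠ -1 ∧
                    PySem.Chars.find t ['#'] < PySem.Chars.find t ['=']) by rintro ⟨-, h⟩; omega), ht]
                simp [replace_filter, hsp]

-- ===== VERDICT (by name: the statement is the Claim_ definition above) =====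
theorem getParam_spec : Claim_equal_getParam := by
  intro line _
  unfold Spec_getParam getParam getParam_alt
  have hb : ("=" : String).toList = ['='] := rfl
  have hb2 : ("#" : String).toList = ['#'] := rfl
  have hfind : PySem.Str.find line "=" = PySem.Chars.find line.toList ['='] := by
    simp [PySem.Str.find_eq, hb]
  have hfind2 : PySem.Str.find line "#" = PySem.Chars.find line.toList ['#'] := by
    simp [PySem.Str.find_eq, hb2]
  rw [main_lemma line.toList []]
  simp only [hfind, hfind2, List.nil_append]
  by_cases he : PySem.Chars.find line.toList ['='] = -1
  · simp [he]
  · simp only [he, if_false]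
    by_cases hc : PySem.Chars.find line.toList ['#'] ≠ -1 ∧
        PySem.Chars.find line.toList ['#'] < PySem.Chars.find line.toList ['=']
    · simp [hc]
    · have hnn : 0 ≤ PySem.Chars.find line.toList ['='] := by
        have := PySem.Chars.neg_one_le_find line.toList ['=']
        omega
      simp only [if_neg hc]
      apply String.ext
      rw [PySem.Str.toList_replace]
      have hsl : (PySem.Str.slice line none (some (PySem.Chars.find line.toList ['=']))).toList
          = line.toList.take (PySem.Chars.find line.toList ['=']).toNat := by
        rw [PySem.Str.toList_slice]
        simp
        exact PySem.List.slice_to _ hnn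
      rw [hsl]
      have h1 : (" " : String).toList = [' '] := rfl
      have h2 : ("" : String).toList = [] := rfl
      rw [h1, h2]
      simp
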